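-- pv_equiv track=rewrite | github.com/Nichm0617/Cryptography-Project | DES.py | circularShift28
-- ===== SOURCE A (Python) =====
-- def circularShift28(n,m):
--     n2 = (n << 1) & 0b1111111111111111111111111111
--     # 5th bit was a 1 - add 1 to n2
--     if n > 0b0111111111111111111111111111:
--         n2 += 1
--     if(m == 1):
--         return n2
--     else:
--         return circularShift28(n2,m-1)
-- ===== SOURCE B (Python) =====
-- def circularShift28(n, m):
--     cur = n
--     for _ in range(m):
--         n2 = (cur << 1) & 0b1111111111111111111111111111
--         if cur > 0b0111111111111111111111111111:
--             n2 += 1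
--         cur = n2
--     return cur
-- ===== Notes on version B (the rewrite author's own statement) =====
-- stated objective: simpler
-- what changed: Replaces the tail recursion (shift once, recurse with m-1 until m==1) by a plain for-loop over range(m) applying the same one-bit circular step to an accumulator.
import Mathlib
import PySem

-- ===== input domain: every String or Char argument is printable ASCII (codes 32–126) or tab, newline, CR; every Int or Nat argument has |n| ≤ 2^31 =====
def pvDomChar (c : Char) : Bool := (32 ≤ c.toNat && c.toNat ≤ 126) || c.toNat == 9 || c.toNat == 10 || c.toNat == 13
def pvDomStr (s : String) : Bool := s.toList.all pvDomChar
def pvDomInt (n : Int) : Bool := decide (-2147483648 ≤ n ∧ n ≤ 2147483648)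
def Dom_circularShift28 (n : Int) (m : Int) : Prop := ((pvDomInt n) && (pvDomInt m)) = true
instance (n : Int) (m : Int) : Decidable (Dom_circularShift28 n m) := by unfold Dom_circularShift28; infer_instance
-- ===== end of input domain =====

-- B replaces A's tail recursion by an iterative for-loop applying the same one-bit circular step; same O(m) cost.


-- ===== PORT A =====
-- Python's (n << 1) & 0b1111...1 (28 ones) equals (2*n) mod 2^28 exactly for every int n
-- (two's-complement AND with 2^28-1); Int.emod with a positive modulus matches Python %.
-- A recurses with m-1 until m == 1; fuel (m-1).toNat makes that structural (for m ≤ 0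
-- Python raises RecursionError, excluded by Pre_).
def circularShift28Go : Int → Nat → Int
  | n, 0 =>
    let n2 := (n * 2) % 268435456
    if n > 134217727 then n2 + 1 else n2
  | n, k + 1 =>
    let n2 := (n * 2) % 268435456
    let n2 := if n > 134217727 then n2 + 1 else n2
    circularShift28Go n2 k

def circularShift28 (n : Int) (m : Int) : Int :=
  circularShift28Go n (m - 1).toNat

-- ===== PORT B =====
def circularShift28Step (cur : Int) : Int :=
  let n2 := (cur * 2) % 268435456
  if cur > 134217727 then n2 + 1 else n2

def circularShift28Loop : Nat → Int → Int
  | 0, cur => cur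
  | k + 1, cur => circularShift28Loop k (circularShift28Step cur)

def circularShift28_alt (n : Int) (m : Int) : Int :=
  circularShift28Loop m.toNat n

-- ===== PRECONDITION & SPEC =====
-- Pre_ excludes m ≤ 0, on which Python A recurses past m == 1 forever and raises RecursionError.
def Pre_circularShift28 (n : Int) (m : Int) : Prop := 1 ≤ m
instance (n : Int) (m : Int) : Decidable (Pre_circularShift28 n m) := by unfold Pre_circularShift28; infer_instance
def pvWitness_circularShift28 : Int × Int := (5, 2)

def Spec_circularShift28 (n : Int) (m : Int) (out : Int) : Prop := out = circularShift28_alt n m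
instance (n : Int) (m : Int) (out : Int) : Decidable (Spec_circularShift28 n m out) := by unfold Spec_circularShift28; infer_instance

-- ===== CLAIM (what is proved, stated in full; the proofs are below) =====
def Claim_equal_circularShift28 : Prop := ∀ (n : Int) (m : Int), Dom_circularShift28 n m → Pre_circularShift28 n m → Spec_circularShift28 n m (circularShift28 n m)

-- ===== LEMMAS AND PROOFS =====
theorem go_eq_loop (k : Nat) (n : Int) :
    circularShift28Go n k = circularShift28Loop (k + 1) n := by
  induction k generalizing n with
  | zero => rfl
  | succ k ih =>
    simp only [circularShift28Go, circularShift28Loop, circularShift28Step]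
    exact ih _

-- ===== VERDICT (by name: the statement is the Claim_ definition above) =====
theorem circularShift28_spec : Claim_equal_circularShift28 := by
  intro n m _ hm
  unfold Pre_circularShift28 at hm
  unfold Spec_circularShift28 circularShift28 circularShift28_alt
  rw [go_eq_loop]
  congr 1
  omega
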